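-- pv_equiv track=rewrite | github.com/wuchenxi2587-coder/-kuairand-cross-domain-ranking | src/models/modules/feature_slices.py | build_feature_slices
-- ===== SOURCE A (Python) =====
-- from typing import Callable, Dict, List, Optional, Sequence, Tuple
--
-- FeatureSlices = Dict[str, Tuple[int, int]]
--
-- def build_feature_slices(block_dims: Dict[str, int]) -> FeatureSlices:
--     """
--     根据每个子块维度构建连续切片。
--
--     Args:
--         block_dims: 子块维度，要求按最终 concat 顺序给出。
--
--     Returns:
--         例如 {"user_interest": (0, 64), "cand_repr": (64, 112), ...}
--     """
--     slices: FeatureSlices = {}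
--     start = 0
--     for name, dim in block_dims.items():
--         end = start + int(dim)
--         slices[name] = (start, end)
--         start = end
--     return slices
-- ===== SOURCE B (Python) =====
-- def build_feature_slices(block_dims):
--     """Divide and conquer: build each half's slices relative to its own origin,
--     then relocate the right half by the left half's total width."""
--     items = [(name, int(d)) for name, d in block_dims.items()]
--
--     def solve(seg):
--         # returns (slices relative to offset 0, total width of seg)
--         if not seg:
--             return [], 0
--         if len(seg) == 1:
--             name, d = seg[0]
--             return [(name, 0, d)], d
--         mid = len(seg) // 2
--         left, lw = solve(seg[:mid])
--         right, rw = solve(seg[mid:])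
--         return left + [(n, lw + s, lw + e) for n, s, e in right], lw + rw
--
--     parts, _ = solve(items)
--     return {n: (s, e) for n, s, e in parts}
-- ===== Notes on version B (the rewrite author's own statement) =====
-- stated objective: alternative
-- what changed: Replaces A's left-to-right running-accumulator pass with a divide-and-conquer scheme: each half's slices are built relative to its own origin and the right half is then relocated by the left half's total width.
import Mathlib
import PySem

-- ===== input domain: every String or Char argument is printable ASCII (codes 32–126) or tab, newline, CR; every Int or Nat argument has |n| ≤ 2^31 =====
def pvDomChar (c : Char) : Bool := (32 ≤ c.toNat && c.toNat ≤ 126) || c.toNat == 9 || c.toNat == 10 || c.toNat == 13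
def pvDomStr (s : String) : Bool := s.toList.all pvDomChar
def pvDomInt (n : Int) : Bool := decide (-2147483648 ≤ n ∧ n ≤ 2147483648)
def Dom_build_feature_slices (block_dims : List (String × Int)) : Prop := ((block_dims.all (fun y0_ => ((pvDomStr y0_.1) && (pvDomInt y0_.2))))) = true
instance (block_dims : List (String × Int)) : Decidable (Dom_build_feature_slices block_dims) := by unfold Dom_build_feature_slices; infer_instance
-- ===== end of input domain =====

-- B replaces A's left-to-right running-accumulator pass with divide and conquer:
-- each half's slices are built relative to its own origin and the right half is
-- relocated by the left half's total width (alternative decomposition, not faster).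

-- ===== PORT A =====
-- slices = {}; start = 0; for name, dim in items: end = start+dim; slices[name] = (start,end); start = end
def build_feature_slices (block_dims : List (String × Int)) : List (String × Int × Int) :=
  (block_dims.foldl
    (fun (st : PySem.Dict String (Int × Int) × Int) p =>
      let e := st.2 + p.2
      (st.1.insert p.1 (st.2, e), e))
    (PySem.Dict.empty, 0)).1.items

-- ===== PORT B =====
-- solve(seg): empty -> ([],0); single -> ([(name,0,d)], d); else split at mid,
-- solve halves, shift the right half's slices by the left half's width.
def solveDC : (seg : List (String × Int)) → List (String × Int × Int) × Int
  | [] => ([], 0)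
  | [(n, d)] => ([(n, 0, d)], d)
  | a :: b :: rest =>
    let seg := a :: b :: rest
    let mid := seg.length / 2
    let L := solveDC (seg.take mid)
    let R := solveDC (seg.drop mid)
    (L.1 ++ R.1.map (fun x => (x.1, L.2 + x.2.1, L.2 + x.2.2)), L.2 + R.2)
termination_by seg => seg.length
decreasing_by
  · simp; omega
  · simp; omega

-- items = [(name, int(d)) ...] (int() is the identity on Int); parts = solve(items)[0];
-- return {n: (s, e) for n, s, e in parts}
def build_feature_slices_alt (block_dims : List (String × Int)) : List (String × Int × Int) :=
  let items := block_dims.map (fun p => (p.1, p.2))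
  let parts := (solveDC items).1
  (parts.foldl (fun d x => d.insert x.1 (x.2.1, x.2.2)) PySem.Dict.empty).items

-- ===== PRECONDITION & SPEC =====
-- Pre_ excludes association lists with duplicate keys: A's argument is a Python dict,
-- which can never contain duplicate keys, so such lists correspond to no actual input of A.
def Pre_build_feature_slices (block_dims : List (String × Int)) : Prop :=
  (block_dims.map Prod.fst).Nodup
instance (block_dims : List (String × Int)) : Decidable (Pre_build_feature_slices block_dims) := by
  unfold Pre_build_feature_slices; infer_instance

def pvWitness_build_feature_slices : (List (String × Int)) := [("user_interest", 64), ("cand_repr", 48)]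

def Spec_build_feature_slices (block_dims : List (String × Int)) (out : List (String × Int × Int)) : Prop := out = build_feature_slices_alt block_dims
instance (block_dims : List (String × Int)) (out : List (String × Int × Int)) : Decidable (Spec_build_feature_slices block_dims out) := by unfold Spec_build_feature_slices; infer_instance

-- ===== CLAIM (what is proved, stated in full; the proofs are below) =====
def Claim_equal_build_feature_slices : Prop := ∀ (block_dims : List (String × Int)), Dom_build_feature_slices block_dims → Pre_build_feature_slices block_dims → Spec_build_feature_slices block_dims (build_feature_slices block_dims)

-- ===== LEMMAS AND PROOFS =====

-- Reference recursion: the slice list starting at offset s.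
def gSlices : List (String × Int) → Int → List (String × Int × Int)
  | [], _ => []
  | (n, d) :: t, s => (n, s, s + d) :: gSlices t (s + d)

theorem gSlices_shift (t : List (String × Int)) (a b : Int) :
    gSlices t (a + b) = (gSlices t b).map (fun x => (x.1, a + x.2.1, a + x.2.2)) := by
  induction t generalizing b with
  | nil => simp [gSlices]
  | cons p r ih =>
    obtain ⟨n, d⟩ := p
    simp only [gSlices, List.map_cons]
    rw [add_assoc, ih (b + d)]

theorem gSlices_append (xs ys : List (String × Int)) (s : Int) :
    gSlices (xs ++ ys) s = gSlices xs s ++ gSlices ys (s + (xs.map Prod.snd).sum) := by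
  induction xs generalizing s with
  | nil => simp [gSlices]
  | cons p t ih =>
    obtain ⟨n, d⟩ := p
    simp only [List.cons_append, gSlices, List.map_cons, List.sum_cons, List.cons_append]
    rw [ih (s + d), ← add_assoc]

theorem map_fst_gSlices (t : List (String × Int)) (s : Int) :
    (gSlices t s).map Prod.fst = t.map Prod.fst := by
  induction t generalizing s with
  | nil => rfl
  | cons p r ih =>
    obtain ⟨n, d⟩ := p
    simp [gSlices, ih]

theorem solveDC_eq_aux (N : Nat) : ∀ seg : List (String × Int), seg.length ≤ N →
    solveDC seg = (gSlices seg 0, (seg.map Prod.snd).sum) := by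
  induction N with
  | zero =>
    intro seg h
    have : seg = [] := List.eq_nil_of_length_eq_zero (Nat.le_zero.mp h)
    subst this
    simp [solveDC, gSlices]
  | succ N ih =>
    intro seg h
    match seg with
    | [] => simp [solveDC, gSlices]
    | [(n, d)] => simp [solveDC, gSlices]
    | a :: b :: rest =>
      simp only [solveDC]
      rw [ih ((a :: b :: rest).take ((a :: b :: rest).length / 2)) (by simp at h ⊢; omega),
          ih ((a :: b :: rest).drop ((a :: b :: rest).length / 2)) (by simp at h ⊢; omega)]
      dsimp only
      conv_rhs => rw [← List.take_append_drop ((a :: b :: rest).length / 2) (a :: b :: rest)]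
      rw [gSlices_append, List.map_append, List.sum_append,
          show (0 : Int) + (((a :: b :: rest).take ((a :: b :: rest).length / 2)).map Prod.snd).sum
            = (((a :: b :: rest).take ((a :: b :: rest).length / 2)).map Prod.snd).sum + 0 by ring,
          gSlices_shift]

theorem solveDC_eq (seg : List (String × Int)) :
    solveDC seg = (gSlices seg 0, (seg.map Prod.snd).sum) :=
  solveDC_eq_aux seg.length seg le_rfl

theorem fold_insert_items (l : List (String × Int × Int)) (d : PySem.Dict String (Int × Int))
    (hnd : (l.map Prod.fst).Nodup)
    (hfresh : ∀ p ∈ l, d.contains p.1 = false) :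
    (l.foldl (fun d x => d.insert x.1 (x.2.1, x.2.2)) d).items = d.items ++ l := by
  induction l generalizing d with
  | nil => simp
  | cons p t ih =>
    simp only [List.map_cons, List.nodup_cons] at hnd
    have hfn : d.contains p.1 = false := hfresh p (by simp)
    simp only [List.foldl_cons]
    rw [ih _ hnd.2]
    · rw [PySem.Dict.items_insert_of_not_contains _ _ hfn]
      simp
    · intro q hq
      rw [PySem.Dict.contains_insert]
      have hq1 : q.1 ∈ t.map Prod.fst := List.mem_map_of_mem hq
      have hne : q.1 ≠ p.1 := fun h => hnd.1 (h ▸ hq1)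
      simp [hne, hfresh q (List.mem_cons_of_mem _ hq)]

theorem alt_eq_gSlices (bd : List (String × Int)) (hpre : (bd.map Prod.fst).Nodup) :
    build_feature_slices_alt bd = gSlices bd 0 := by
  unfold build_feature_slices_alt
  have hitems : bd.map (fun p : String × Int => (p.1, p.2)) = bd := by
    simp
  simp only [hitems, solveDC_eq]
  rw [fold_insert_items (gSlices bd 0) PySem.Dict.empty
        (by rw [map_fst_gSlices]; exact hpre) (by intro p _; rfl)]
  rfl

theorem a_loop_eq_gSlices (bd : List (String × Int)) (d : PySem.Dict String (Int × Int)) (s : Int)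
    (hnd : (bd.map Prod.fst).Nodup)
    (hfresh : ∀ p ∈ bd, d.contains p.1 = false) :
    ((bd.foldl
        (fun (st : PySem.Dict String (Int × Int) × Int) p =>
          let e := st.2 + p.2
          (st.1.insert p.1 (st.2, e), e))
        (d, s)).1).items = d.items ++ gSlices bd s := by
  induction bd generalizing d s with
  | nil => simp [gSlices]
  | cons p t ih =>
    obtain ⟨n, dim⟩ := p
    simp only [List.map_cons, List.nodup_cons] at hnd
    have hfn : d.contains n = false := hfresh (n, dim) (by simp)
    simp only [List.foldl_cons, gSlices]
    rw [ih _ _ hnd.2]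
    · rw [PySem.Dict.items_insert_of_not_contains _ _ hfn]
      simp
    · intro q hq
      rw [PySem.Dict.contains_insert]
      have hq1 : q.1 ∈ t.map Prod.fst := List.mem_map_of_mem hq
      have hne : q.1 ≠ n := fun h => hnd.1 (h ▸ hq1)
      simp [hne, hfresh q (List.mem_cons_of_mem _ hq)]

-- ===== VERDICT (by name: the statement is the Claim_ definition above) =====
theorem build_feature_slices_spec : Claim_equal_build_feature_slices := by
  intro bd _ hpre
  unfold Spec_build_feature_slices build_feature_slices
  rw [a_loop_eq_gSlices bd PySem.Dict.empty 0 hpre (by intro p _; rfl)]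
  rw [alt_eq_gSlices bd hpre]
  rfl
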